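-- pv_equiv track=rewrite | github.com/skyoxu/moli_land | scripts/sc/_marathon_policy.py | _axes_for_categories
-- ===== SOURCE A (Python) =====
-- def _axes_for_categories(categories: list[str]) -> list[str]:
--     axes: set[str] = set()
--     for category in categories:
--         if category in {"docs", "ci", "tasking"}:
--             axes.add("governance")
--         if category in {"scripts", "core", "godot-runtime", "solution"}:
--             axes.add("implementation")
--         if category == "core-contracts":
--             axes.add("contracts")
--         if category in {"core-tests", "godot-tests"}:
--             axes.add("tests")
--         if category == "ci":
--             axes.add("ci")
--         if category == "tasking":
--             axes.add("tasking")
--     return sorted(axes)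
-- ===== SOURCE B (Python) =====
-- # Inverted table: iterate over the (fixed, alphabetically ordered) AXES and
-- # include an axis iff any of its trigger categories occurs in the input.
-- # Builds the result already sorted -- no per-category accumulation, no sort.
-- _AXIS_TABLE = [
--     ("ci", ["ci"]),
--     ("contracts", ["core-contracts"]),
--     ("governance", ["docs", "ci", "tasking"]),
--     ("implementation", ["scripts", "core", "godot-runtime", "solution"]),
--     ("tasking", ["tasking"]),
--     ("tests", ["core-tests", "godot-tests"]),
-- ]
--
--
-- def _axes_for_categories(categories: list[str]) -> list[str]:
--     present = set(categories)
--     return [axis for axis, triggers in _AXIS_TABLE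
--             if any(t in present for t in triggers)]
-- ===== Notes on version B (the rewrite author's own statement) =====
-- stated objective: alternative
-- what changed: Inverted the mapping: instead of accumulating axes per category into a set and sorting, B iterates once over a fixed alphabetically ordered axis->triggers table and emits each axis whose trigger set meets the input, so the output is built already sorted with no set accumulation and no sort call.
import Mathlib
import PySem

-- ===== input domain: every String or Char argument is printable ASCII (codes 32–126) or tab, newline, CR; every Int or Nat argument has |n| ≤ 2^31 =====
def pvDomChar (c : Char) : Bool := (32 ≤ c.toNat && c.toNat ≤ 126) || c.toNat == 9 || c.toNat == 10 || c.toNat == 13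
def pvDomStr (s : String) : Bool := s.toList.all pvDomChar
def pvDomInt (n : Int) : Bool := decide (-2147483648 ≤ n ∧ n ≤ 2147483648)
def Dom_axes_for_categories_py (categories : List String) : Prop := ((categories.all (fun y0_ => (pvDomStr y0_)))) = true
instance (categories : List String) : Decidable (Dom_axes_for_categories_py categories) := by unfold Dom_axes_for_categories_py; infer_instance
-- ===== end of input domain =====

-- B inverts the mapping: it scans a fixed alphabetically ordered axis→triggers
-- table and emits each axis whose triggers meet the input, so the result is
-- built already sorted, with no per-category set accumulation and no sort call.

-- ===== PORT A =====
-- loop body of A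
def pvStepA (axes : PySem.Set String) (category : String) : PySem.Set String :=
  let axes := if category == "docs" || category == "ci" || category == "tasking" then
      PySem.Set.add axes "governance" else axes
  let axes := if category == "scripts" || category == "core" || category == "godot-runtime" || category == "solution" then
      PySem.Set.add axes "implementation" else axes
  let axes := if category == "core-contracts" then PySem.Set.add axes "contracts" else axes
  let axes := if category == "core-tests" || category == "godot-tests" then
      PySem.Set.add axes "tests" else axes
  let axes := if category == "ci" then PySem.Set.add axes "ci" else axes
  let axes := if category == "tasking" then PySem.Set.add axes "tasking" else axes
  axes

def axes_for_categories_py (categories : List String) : List String :=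
  let axes : PySem.Set String := categories.foldl pvStepA PySem.Set.empty
  PySem.List.sorted axes (fun x => x) false

-- ===== PORT B =====
-- _AXIS_TABLE of Source B
def pvAxisTable : List (String × List String) :=
  [("ci", ["ci"]),
   ("contracts", ["core-contracts"]),
   ("governance", ["docs", "ci", "tasking"]),
   ("implementation", ["scripts", "core", "godot-runtime", "solution"]),
   ("tasking", ["tasking"]),
   ("tests", ["core-tests", "godot-tests"])]

def axes_for_categories_py_alt (categories : List String) : List String :=
  let present : PySem.Set String := PySem.Set.ofList categories
  (pvAxisTable.filter (fun p => p.2.any (fun t => PySem.Set.contains present t))).map Prod.fst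

-- ===== PRECONDITION & SPEC =====
def Spec_axes_for_categories_py (categories : List String) (out : List String) : Prop := out = axes_for_categories_py_alt categories
instance (categories : List String) (out : List String) : Decidable (Spec_axes_for_categories_py categories out) := by unfold Spec_axes_for_categories_py; infer_instance

-- ===== CLAIM (what is proved, stated in full; the proofs are below) =====
def Claim_equal_axes_for_categories_py : Prop := ∀ (categories : List String), Dom_axes_for_categories_py categories → Spec_axes_for_categories_py categories (axes_for_categories_py categories)

-- ===== LEMMAS AND PROOFS =====

-- which axis x does category c trigger in A's branch chain
def pvTrig (c x : String) : Bool :=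
  ((c == "docs" || c == "ci" || c == "tasking") && x == "governance") ||
  ((c == "scripts" || c == "core" || c == "godot-runtime" || c == "solution") && x == "implementation") ||
  (c == "core-contracts" && x == "contracts") ||
  ((c == "core-tests" || c == "godot-tests") && x == "tests") ||
  (c == "ci" && x == "ci") ||
  (c == "tasking" && x == "tasking")

theorem mem_pvStepA (s : PySem.Set String) (c x : String) :
    x ∈ pvStepA s c ↔ x ∈ s ∨ pvTrig c x = true := by
  simp only [pvStepA, pvTrig]
  split_ifs with h1 h2 h3 h4 h5 h6 <;>
    simp_all [PySem.Set.mem_add] <;> tauto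

theorem mem_foldl_pvStepA (cats : List String) (s : PySem.Set String) (x : String) :
    x ∈ cats.foldl pvStepA s ↔ x ∈ s ∨ ∃ c ∈ cats, pvTrig c x = true := by
  induction cats generalizing s with
  | nil => simp
  | cons c cs ih =>
      simp [List.foldl_cons, ih, mem_pvStepA]
      tauto

theorem nodup_pvStepA (s : PySem.Set String) (c : String) (h : s.Nodup) :
    (pvStepA s c).Nodup := by
  simp only [pvStepA]
  split_ifs <;> repeat first | assumption | apply PySem.Set.nodup_add

theorem nodup_foldl_pvStepA (cats : List String) (s : PySem.Set String) (h : s.Nodup) :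
    (cats.foldl pvStepA s).Nodup := by
  induction cats generalizing s with
  | nil => exact h
  | cons c cs ih => exact ih _ (nodup_pvStepA s c h)

theorem pairwise_table :
    (["ci", "contracts", "governance", "implementation", "tasking", "tests"] : List String).Pairwise (· < ·) := by
  refine .cons ?_ (.cons ?_ (.cons ?_ (.cons ?_ (.cons ?_ (.cons (by simp) .nil))))) <;>
    (intro a ha; fin_cases ha <;> (rw [String.lt_iff_toList_lt]; decide))

theorem pairwise_alt (cats : List String) :
    (axes_for_categories_py_alt cats).Pairwise (· < ·) :=
  List.Pairwise.sublist ((List.filter_sublist).map Prod.fst) pairwise_table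

theorem mem_alt (cats : List String) (x : String) :
    x ∈ axes_for_categories_py_alt cats ↔ ∃ c ∈ cats, pvTrig c x = true := by
  simp only [axes_for_categories_py_alt, List.mem_map, List.mem_filter]
  constructor
  · rintro ⟨p, ⟨hp, hany⟩, rfl⟩
    simp only [pvAxisTable, List.mem_cons, List.not_mem_nil, or_false] at hp
    rcases hp with rfl | rfl | rfl | rfl | rfl | rfl <;>
      simp only [List.any_cons, List.any_nil, Bool.or_eq_true, Bool.or_false,
        PySem.Set.contains_iff, PySem.Set.mem_ofList] at hany <;>
      first
      | exact ⟨_, hany, by decide⟩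
      | (rcases hany with h | h | h | h <;> exact ⟨_, h, by decide⟩)
      | (rcases hany with h | h | h <;> exact ⟨_, h, by decide⟩)
      | (rcases hany with h | h <;> exact ⟨_, h, by decide⟩)
  · rintro ⟨c, hc, ht⟩
    simp only [pvTrig, Bool.or_eq_true, Bool.and_eq_true, beq_iff_eq] at ht
    rcases ht with ((((⟨hcs, rfl⟩ | ⟨hcs, rfl⟩) | ⟨rfl, rfl⟩) | ⟨hcs, rfl⟩) | ⟨rfl, rfl⟩) | ⟨rfl, rfl⟩
    · refine ⟨("governance", ["docs", "ci", "tasking"]), ⟨by simp [pvAxisTable], ?_⟩, rfl⟩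
      simp only [List.any_cons, List.any_nil, Bool.or_eq_true, Bool.or_false,
        PySem.Set.contains_iff, PySem.Set.mem_ofList]
      rcases hcs with (rfl | rfl) | rfl <;> tauto
    · refine ⟨("implementation", ["scripts", "core", "godot-runtime", "solution"]), ⟨by simp [pvAxisTable], ?_⟩, rfl⟩
      simp only [List.any_cons, List.any_nil, Bool.or_eq_true, Bool.or_false,
        PySem.Set.contains_iff, PySem.Set.mem_ofList]
      rcases hcs with ((rfl | rfl) | rfl) | rfl <;> tauto
    · refine ⟨("contracts", ["core-contracts"]), ⟨by simp [pvAxisTable], ?_⟩, rfl⟩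
      simp [PySem.Set.mem_ofList, hc]
    · refine ⟨("tests", ["core-tests", "godot-tests"]), ⟨by simp [pvAxisTable], ?_⟩, rfl⟩
      simp only [List.any_cons, List.any_nil, Bool.or_eq_true, Bool.or_false,
        PySem.Set.contains_iff, PySem.Set.mem_ofList]
      rcases hcs with rfl | rfl <;> tauto
    · refine ⟨("ci", ["ci"]), ⟨by simp [pvAxisTable], ?_⟩, rfl⟩
      simp [PySem.Set.mem_ofList, hc]
    · refine ⟨("tasking", ["tasking"]), ⟨by simp [pvAxisTable], ?_⟩, rfl⟩
      simp [PySem.Set.mem_ofList, hc]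

-- ===== VERDICT (by name: the statement is the Claim_ definition above) =====
theorem axes_for_categories_py_spec : Claim_equal_axes_for_categories_py := by
  intro cats _
  unfold Spec_axes_for_categories_py
  show PySem.List.sorted (cats.foldl pvStepA PySem.Set.empty) (fun x => x) false
      = axes_for_categories_py_alt cats
  apply PySem.List.sorted_eq_of_perm_of_pairwise_lt
  · apply (List.perm_ext_iff_of_nodup ((pairwise_alt cats).imp ne_of_lt)
      (nodup_foldl_pvStepA cats _ (by simp [PySem.Set.empty]))).mpr
    intro x
    rw [mem_alt, mem_foldl_pvStepA]
    simp [PySem.Set.empty]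
  · exact pairwise_alt cats
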